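-- pv_equiv track=rewrite | github.com/sajeethphilip/IDBNN | DynamicCNN.py | calculate_max_depth
-- ===== SOURCE A (Python) =====
-- def calculate_max_depth(H, W):
--     """Calculate maximum layers before spatial collapse."""
--     max_depth = 0
--     current_H, current_W = H, W
--     while current_H >= 2 and current_W >= 2:  # Ensure at least 2x2 after pooling
--         current_H = current_H // 2  # MaxPool2d(2) reduces size
--         current_W = current_W // 2
--         max_depth += 1
--     return max_depth
-- ===== SOURCE B (Python) =====
-- def calculate_max_depth(H, W):
--     """Calculate maximum layers before spatial collapse."""
--     if H < 2 or W < 2: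
--         return 0
--     return min(H.bit_length(), W.bit_length()) - 1
-- ===== Notes on version B (the rewrite author's own statement) =====
-- stated objective: simpler
-- what changed: Replaced the halving loop with a closed form: for H,W >= 2 the loop runs min(H.bit_length(), W.bit_length()) - 1 times, so B returns that directly (0 when either side is below 2).
import Mathlib
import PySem

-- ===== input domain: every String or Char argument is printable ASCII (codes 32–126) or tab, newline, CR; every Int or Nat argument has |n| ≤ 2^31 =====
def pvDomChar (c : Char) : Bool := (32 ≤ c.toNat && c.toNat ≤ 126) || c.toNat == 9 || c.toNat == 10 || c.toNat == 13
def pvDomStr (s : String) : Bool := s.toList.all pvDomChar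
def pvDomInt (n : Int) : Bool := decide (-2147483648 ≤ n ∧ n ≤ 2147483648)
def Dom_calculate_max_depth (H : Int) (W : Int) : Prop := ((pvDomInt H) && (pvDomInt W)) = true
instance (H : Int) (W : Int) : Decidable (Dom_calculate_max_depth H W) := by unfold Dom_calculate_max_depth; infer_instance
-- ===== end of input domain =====

-- B replaces A's halving loop by the closed form min(bit_length H, bit_length W) - 1 (0 if either side < 2); equivalence proved for all inputs.


-- ===== PORT A =====
-- the while loop of A: state (current_H, current_W, max_depth)
def cmdLoop (h : Int) (w : Int) (d : Int) : Int :=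
  if h ≥ 2 ∧ w ≥ 2 then
    cmdLoop (PySem.Int.floordiv h 2) (PySem.Int.floordiv w 2) (d + 1)
  else d
termination_by h.toNat
decreasing_by
  have : PySem.Int.floordiv h 2 = h / 2 := PySem.Int.floordiv_eq_ediv_of_pos (by omega)
  rw [this]; omega

def calculate_max_depth (H : Int) (W : Int) : Int := cmdLoop H W 0

-- ===== PORT B =====
def calculate_max_depth_alt (H : Int) (W : Int) : Int :=
  if H < 2 ∨ W < 2 then 0
  else min ((PySem.Int.bitLength H : Int)) ((PySem.Int.bitLength W : Int)) - 1

-- ===== PRECONDITION & SPEC =====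
def Spec_calculate_max_depth (H : Int) (W : Int) (out : Int) : Prop := out = calculate_max_depth_alt H W
instance (H : Int) (W : Int) (out : Int) : Decidable (Spec_calculate_max_depth H W out) := by unfold Spec_calculate_max_depth; infer_instance

-- ===== CLAIM (what is proved, stated in full; the proofs are below) =====
def Claim_equal_calculate_max_depth : Prop := ∀ (H : Int) (W : Int), Dom_calculate_max_depth H W → Spec_calculate_max_depth H W (calculate_max_depth H W)

-- ===== LEMMAS AND PROOFS =====

lemma bitLength_pos_of_pos {n : Int} (hn : 0 < n) : 1 ≤ PySem.Int.bitLength n := by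
  rw [PySem.Int.bitLength_of_pos hn]; omega

lemma cmdLoop_eq (h w d : Int) : cmdLoop h w d = d + calculate_max_depth_alt h w := by
  fun_induction cmdLoop h w d with
  | case1 h w d hc ih =>
    obtain ⟨hh, hw⟩ := hc
    have eh : PySem.Int.floordiv h 2 = h / 2 := PySem.Int.floordiv_eq_ediv_of_pos (by omega)
    have ew : PySem.Int.floordiv w 2 = w / 2 := PySem.Int.floordiv_eq_ediv_of_pos (by omega)
    have hbh := PySem.Int.bitLength_of_pos (show (0:Int) < h by omega)
    have hbw := PySem.Int.bitLength_of_pos (show (0:Int) < w by omega)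
    have hh' : (1:Int) ≤ h / 2 := by omega
    have hw' : (1:Int) ≤ w / 2 := by omega
    have hph := bitLength_pos_of_pos (show (0:Int) < h / 2 by omega)
    have hpw := bitLength_pos_of_pos (show (0:Int) < w / 2 by omega)
    rw [ih]
    unfold calculate_max_depth_alt
    rw [eh, ew] at *
    by_cases hsm : h / 2 < 2 ∨ w / 2 < 2
    · -- one of the halves collapsed to 1: its bitLength is 1
      have h1 : ∀ n : Int, n = 1 → PySem.Int.bitLength n = 1 := by
        intro n hn; subst hn; decide
      simp only [if_pos hsm, if_neg (show ¬(h < 2 ∨ w < 2) by omega)]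
      rcases hsm with hs | hs
      · have := h1 (h / 2) (by omega)
        rw [hbh, hbw, this]
        omega
      · have := h1 (w / 2) (by omega)
        rw [hbh, hbw, this]
        omega
    · simp only [if_neg hsm, if_neg (show ¬(h < 2 ∨ w < 2) by omega)]
      rw [hbh, hbw]
      push_cast
      omega
  | case2 h w d hc =>
    unfold calculate_max_depth_alt
    rw [if_pos (by omega)]
    omega

-- ===== VERDICT (by name: the statement is the Claim_ definition above) =====
theorem calculate_max_depth_spec : Claim_equal_calculate_max_depth := by
  intro H W _
  show calculate_max_depth H W = _
  unfold calculate_max_depth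
  rw [cmdLoop_eq]
  omega
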